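-- pv_equiv track=rewrite | github.com/Nikitanikitos/CodeWars | 4kyu/brainfuck_to_c.py | brainfuck_to_c
-- ===== SOURCE A (Python) =====
-- CODE = {"+": "*p +=", "-": "*p -=",
--         ">": "p +=", "<": "p -=",
--         ".": "putchar(*p);\n",
--         ",": "*p = getchar();\n",
--         "[": "if (*p) do {\n",
--         "]": "} while (*p);\n"}
--
-- def valid_parentheses(string):
--     top = 0
--     stack = ''
--     for char in string:
--         if char == '[':
--             stack += char
--             top += 1
--         if char == ']':
--             if top == 0: return False
--             top -= 1
--             if not stack[top] == '[':
--                 return False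
--     return top == 0
--
-- def refactor_code(source_code):
--     while True:
--         if '[]' in source_code:
--             source_code = source_code[:source_code.index('[]')] + source_code[source_code.index('[]') + 2:]
--         else:
--             return source_code
--
-- def brainfuck_to_c(source_code):
--     if valid_parentheses(source_code):
--         source_code = refactor_code(source_code)
--         result = ""
--         space = ""
--         p = 0
--         flag = True
--         for char in source_code:
--             if char == ']':
--                 space = ""
--             if char in "+-><" and flag:
--                 result += space + CODE[char]
--                 flag = False
--             if char in '+-<>':
--                 p += 1
--             elif flag is False and char in CODE.keys():
--                 result += f" {p};\n"
--                 p = 0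
--                 flag = True
--                 result += space + CODE[char]
--             elif char in CODE.keys():
--                 result += space + CODE[char]
--             if char == '[':
--                 space = "  "
--
--         if flag is False:
--             result += f" {p};\n"
--         return result
--     else:
--         return 'Error!'
-- ===== SOURCE B (Python) =====
-- CODE = {"+": "*p +=", "-": "*p -=",
--         ">": "p +=", "<": "p -=",
--         ".": "putchar(*p);\n",
--         ",": "*p = getchar();\n",
--         "[": "if (*p) do {\n",
--         "]": "} while (*p);\n"}
--
--
-- def brainfuck_to_c(source_code):
--     # one pass: bracket balance check + strip empty '[]' pairs (incl. nested) with a stack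
--     depth = 0
--     buf = []
--     for ch in source_code:
--         if ch == '[':
--             depth += 1
--             buf.append(ch)
--         elif ch == ']':
--             if depth == 0:
--                 return 'Error!'
--             depth -= 1
--             if buf and buf[-1] == '[':
--                 buf.pop()
--             else:
--                 buf.append(ch)
--         else:
--             buf.append(ch)
--     if depth != 0:
--         return 'Error!'
--     # codegen: tokenize the remaining commands into maximal '+-<>' runs
--     code = [c for c in buf if c in CODE]
--     out = []
--     space = ""
--     i = 0
--     n = len(code)
--     while i < n:
--         c = code[i]
--         if c in '+-<>':
--             j = i + 1
--             while j < n and code[j] in '+-<>':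
--                 j += 1
--             out.append(space + CODE[c] + f" {j - i};\n")
--             i = j
--         else:
--             if c == ']':
--                 space = ""
--             out.append(space + CODE[c])
--             if c == '[':
--                 space = "  "
--             i += 1
--     return "".join(out)
-- ===== Notes on version B (the rewrite author's own statement) =====
-- stated objective: faster
-- what changed: Replaces A's repeated find-and-rebuild loop that deletes one empty loop pair per whole-string scan with a single fused pass that both checks bracket balance with a depth counter (instead of A's string stack) and strips empty pairs with a stack, and replaces the flag/counter codegen loop with a tokenizer over maximal runs of arithmetic/pointer commands.
import Mathlib
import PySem

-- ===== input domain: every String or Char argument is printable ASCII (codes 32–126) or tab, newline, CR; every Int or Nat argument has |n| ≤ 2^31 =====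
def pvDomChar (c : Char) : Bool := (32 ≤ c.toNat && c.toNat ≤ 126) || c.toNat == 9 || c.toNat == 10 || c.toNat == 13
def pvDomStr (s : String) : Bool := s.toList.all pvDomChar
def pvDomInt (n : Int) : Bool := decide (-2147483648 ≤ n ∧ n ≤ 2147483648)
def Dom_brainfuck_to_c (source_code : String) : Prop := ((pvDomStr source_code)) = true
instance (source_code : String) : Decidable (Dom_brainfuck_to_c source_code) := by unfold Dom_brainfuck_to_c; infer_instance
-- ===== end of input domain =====

-- B replaces A's quadratic repeated scan/rebuild removal of '[]' with a single stack pass,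
-- the string-stack validity check with a depth counter, and the flag/counter codegen loop
-- with a tokenizer over maximal '+-<>' runs (objective: faster, one pass per stage).

-- shared module constant CODE (values as char lists; both Pythons share it)
def pvCode (c : Char) : List Char :=
  if c = '+' then "*p +=".toList
  else if c = '-' then "*p -=".toList
  else if c = '>' then "p +=".toList
  else if c = '<' then "p -=".toList
  else if c = '.' then "putchar(*p);\n".toList
  else if c = ',' then "*p = getchar();\n".toList
  else if c = '[' then "if (*p) do {\n".toList
  else if c = ']' then "} while (*p);\n".toList
  else []

-- 'char in CODE.keys()'
def pvInCode (c : Char) : Bool :=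
  c = '+' || c = '-' || c = '>' || c = '<' || c = '.' || c = ',' || c = '[' || c = ']'

-- 'char in "+-><"' / 'char in "+-<>"' (same set)
def pvArith (c : Char) : Bool := c = '+' || c = '-' || c = '>' || c = '<'

-- f" {p};\n"
def pvFlush (p : Int) : List Char := " ".toList ++ (PySem.Int.toStr p).toList ++ ";\n".toList

-- ===== PORT A =====
-- the for-loop of valid_parentheses with its two early returns, state (top, stack)
def pvValidLoopA : List Char → Int → List Char → Bool
  | [], top, _ => top == 0
  | c :: rest, top, stack =>
    let top1 := if c = '[' then top + 1 else top
    let stack1 := if c = '[' then stack ++ [c] else stack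
    if c = ']' then
      if top1 == 0 then false
      else if !(PySem.List.pyGet? stack1 (top1 - 1) == some '[') then false
      else pvValidLoopA rest (top1 - 1) stack1
    else pvValidLoopA rest top1 stack1

def pvValidA (s : List Char) : Bool := pvValidLoopA s 0 []

-- hand port of source_code.index('[]'): index of the leftmost adjacent '[',']' (exact: leftmost match)
def pvFindPair : List Char → Option Nat
  | [] => none
  | c :: rest =>
    if c = '[' ∧ rest.head? = some ']' then some 0
    else (pvFindPair rest).map (· + 1)

theorem pvFindPair_len {l : List Char} {i : Nat} (h : pvFindPair l = some i) :
    i + 2 ≤ l.length := by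
  induction l generalizing i with
  | nil => simp [pvFindPair] at h
  | cons c rest ih =>
    simp only [pvFindPair] at h
    split at h
    · rename_i hc
      rcases hc with ⟨_, hh⟩
      cases rest with
      | nil => simp at hh
      | cons d t => simp_all; omega
    · rcases Option.map_eq_some_iff.mp h with ⟨j, hj, rfl⟩
      have := ih hj; simp; omega

-- while-loop of refactor_code: remove the leftmost '[]' (slices s[:i] + s[i+2:]) until none is left
def pvRefactorA (l : List Char) : List Char :=
  match h : pvFindPair l with
  | some i => pvRefactorA (l.take i ++ l.drop (i + 2))
  | none => l
termination_by l.length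
decreasing_by
  have := pvFindPair_len h
  simp [List.length_take, List.length_drop]; omega

-- one iteration of A's codegen for-loop, state (result, space, p, flag)
def pvStepA (st : List Char × List Char × Int × Bool) (c : Char) :
    List Char × List Char × Int × Bool :=
  let result := st.1
  let space := st.2.1
  let p := st.2.2.1
  let flag := st.2.2.2
  let space := if c = ']' then [] else space
  let result := if pvArith c && flag then result ++ space ++ pvCode c else result
  let flag := if pvArith c && flag then false else flag
  let (result, p, flag) :=
    if pvArith c then (result, p + 1, flag)
    else if flag == false && pvInCode c then
      (result ++ pvFlush p ++ space ++ pvCode c, 0, true)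
    else if pvInCode c then (result ++ space ++ pvCode c, p, flag)
    else (result, p, flag)
  let space := if c = '[' then "  ".toList else space
  (result, space, p, flag)

def brainfuck_to_c (source_code : String) : String :=
  if pvValidA source_code.toList then
    let sc := pvRefactorA source_code.toList
    let st := sc.foldl pvStepA ([], [], 0, true)
    if st.2.2.2 = false then String.mk (st.1 ++ pvFlush st.2.2.1)
    else String.mk st.1
  else "Error!"

-- ===== PORT B =====
-- B's first loop: depth counter (early 'Error!' = none) fused with the stack-strip of
-- empty '[]' pairs (buf.append / buf[-1] / buf.pop)
def pvScanB : List Char → Int → List Char → Option (List Char)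
  | [], d, buf => if d == 0 then some buf else none
  | c :: rest, d, buf =>
    if c = '[' then pvScanB rest (d + 1) (buf ++ [c])
    else if c = ']' then
      if d == 0 then none
      else pvScanB rest (d - 1) (if buf.getLast? == some '[' then buf.dropLast else buf ++ [c])
    else pvScanB rest d (buf ++ [c])

-- B's while-loop over the token list: maximal '+-<>' runs (inner 'while j < n' = takeWhile/dropWhile)
def pvGenB : List Char → List Char → List Char
  | [], _ => []
  | c :: rest, space =>
    if pvArith c then
      space ++ pvCode c ++ pvFlush (1 + (rest.takeWhile pvArith).length : Nat)
        ++ pvGenB (rest.dropWhile pvArith) space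
    else
      let sp1 := if c = ']' then [] else space
      let sp2 := if c = '[' then "  ".toList else sp1
      sp1 ++ pvCode c ++ pvGenB rest sp2
termination_by l _ => l.length
decreasing_by
  · simp only [List.length_cons]
    exact Nat.lt_succ_of_le (List.length_dropWhile_le _ _)
  · simp

def brainfuck_to_c_alt (source_code : String) : String :=
  match pvScanB source_code.toList 0 [] with
  | none => "Error!"
  | some buf => String.mk (pvGenB (buf.filter pvInCode) [])

-- ===== PRECONDITION & SPEC =====
def Spec_brainfuck_to_c (source_code : String) (out : String) : Prop := out = brainfuck_to_c_alt source_code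
instance (source_code : String) (out : String) : Decidable (Spec_brainfuck_to_c source_code out) := by unfold Spec_brainfuck_to_c; infer_instance

-- ===== CLAIM (what is proved, stated in full; the proofs are below) =====
def Claim_equal_brainfuck_to_c : Prop := ∀ (source_code : String), Dom_brainfuck_to_c source_code → Spec_brainfuck_to_c source_code (brainfuck_to_c source_code)

-- ===== LEMMAS AND PROOFS =====

-- proof-side decompositions of B's fused scan: depth check and pair-stripping separately
def pvBalB : List Char → Int → Bool
  | [], d => d == 0
  | c :: rest, d =>
    if c = '[' then pvBalB rest (d + 1)
    else if c = ']' then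
      if d == 0 then false else pvBalB rest (d - 1)
    else pvBalB rest d

def pvStripStep (buf : List Char) (c : Char) : List Char :=
  if c = ']' && buf.getLast? == some '[' then buf.dropLast else buf ++ [c]

-- B's fused scan = depth check + fold of the strip step
theorem scan_eq (l : List Char) : ∀ (d : Int) (buf : List Char),
    pvScanB l d buf = if pvBalB l d then some (l.foldl pvStripStep buf) else none := by
  induction l with
  | nil => intro d buf; rw [pvScanB, pvBalB]; split <;> simp_all
  | cons c rest ih =>
    intro d buf
    by_cases hc1 : c = '['
    · subst hc1
      rw [pvScanB, pvBalB]
      simp only [List.foldl_cons]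
      rw [show pvStripStep buf '[' = buf ++ ['['] by rw [pvStripStep, if_neg (by simp)]]
      exact ih (d + 1) (buf ++ ['['])
    · by_cases hc2 : c = ']'
      · subst hc2
        rw [pvScanB, pvBalB]
        simp only [if_neg hc1, List.foldl_cons]
        by_cases hd : d = 0
        · simp [hd]
        · rw [if_neg (show ¬((d == 0) = true) by simpa using hd),
              if_neg (show ¬((d == 0) = true) by simpa using hd)]
          rw [show pvStripStep buf ']'
              = if buf.getLast? == some '[' then buf.dropLast else buf ++ [']'] by
            rw [pvStripStep]; simp]
          exact ih (d - 1) _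
      · rw [pvScanB, pvBalB]
        simp only [if_neg hc1, if_neg hc2, List.foldl_cons]
        rw [show pvStripStep buf c = buf ++ [c] by rw [pvStripStep, if_neg (by simp [hc2])]]
        exact ih d (buf ++ [c])

-- facts about the four character classes
theorem arith_facts (c : Char) (h : pvArith c = true) :
    c ≠ '[' ∧ c ≠ ']' ∧ pvInCode c = true := by
  simp only [pvArith, Bool.or_eq_true, decide_eq_true_eq] at h
  rcases h with ((h|h)|h)|h <;> subst h <;> exact ⟨by decide, by decide, by decide⟩

theorem notcode_facts (c : Char) (h : pvInCode c = false) :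
    c ≠ '[' ∧ c ≠ ']' ∧ pvArith c = false := by
  simp only [pvInCode, Bool.or_eq_false_iff, decide_eq_false_iff_not] at h
  obtain ⟨⟨⟨⟨⟨⟨⟨h1,h2⟩,h3⟩,h4⟩,h5⟩,h6⟩,h7⟩,h8⟩ := h
  exact ⟨h7, h8, by simp [pvArith, h1, h2, h3, h4]⟩

-- the four shapes of one iteration of A's loop
theorem stepA_arith_true (c : Char) (h : pvArith c = true) (r sp : List Char) (p : Int) :
    pvStepA (r, sp, p, true) c = (r ++ sp ++ pvCode c, sp, p + 1, false) := by
  obtain ⟨h1, h2, _⟩ := arith_facts c h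
  simp [pvStepA, h, h1, h2]

theorem stepA_arith_false (c : Char) (h : pvArith c = true) (r sp : List Char) (p : Int) :
    pvStepA (r, sp, p, false) c = (r, sp, p + 1, false) := by
  obtain ⟨h1, h2, _⟩ := arith_facts c h
  simp [pvStepA, h, h1, h2]

theorem stepA_nonarith_true (c : Char) (h : pvArith c = false) (hc : pvInCode c = true)
    (r sp : List Char) (p : Int) :
    pvStepA (r, sp, p, true) c =
      (r ++ (if c = ']' then [] else sp) ++ pvCode c,
       (if c = '[' then "  ".toList else if c = ']' then [] else sp), p, true) := by
  simp [pvStepA, h, hc]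

theorem stepA_nonarith_false (c : Char) (h : pvArith c = false) (hc : pvInCode c = true)
    (r sp : List Char) (p : Int) :
    pvStepA (r, sp, p, false) c =
      (r ++ pvFlush p ++ (if c = ']' then [] else sp) ++ pvCode c,
       (if c = '[' then "  ".toList else if c = ']' then [] else sp), 0, true) := by
  simp [pvStepA, h, hc]

theorem stepA_skip (c : Char) (h : pvInCode c = false) (st : List Char × List Char × Int × Bool) :
    pvStepA st c = st := by
  obtain ⟨h1, h2, h3⟩ := notcode_facts c h
  simp [pvStepA, h, h1, h2, h3]

-- validity: A's string-stack check equals B's depth counter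
theorem valid_eq_bal (l : List Char) :
    ∀ (top : Int) (n : Nat), 0 ≤ top → top ≤ n →
      pvValidLoopA l top (List.replicate n '[') = pvBalB l top := by
  induction l with
  | nil => intro top n _ _; simp [pvValidLoopA, pvBalB]
  | cons c rest ih =>
    intro top n h0 hn
    by_cases hc1 : c = '['
    · subst hc1
      rw [pvValidLoopA, pvBalB]
      simp only [← List.replicate_succ']
      rw [if_neg (by decide)]
      exact ih (top + 1) (n + 1) (by omega) (by push_cast; omega)
    · by_cases hc2 : c = ']'
      · subst hc2
        rw [pvValidLoopA, pvBalB]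
        by_cases htz : top = 0
        · simp [htz]
        · have hget : PySem.List.pyGet? (List.replicate n '[') (top - 1) = some '[' := by
            rw [PySem.List.pyGet?_of_nonneg (h := by omega), List.getElem?_replicate,
                if_pos (by omega)]
          simp only [show ((']' : Char) = '[') = False by simp, if_false, if_true, hget]
          rw [if_neg (show ¬((top == 0) = true) by simpa using htz),
              if_neg (show ¬((top == 0) = true) by simpa using htz)]
          rw [if_neg (by simp)]
          exact ih (top - 1) n (by omega) (by omega)
      · rw [pvValidLoopA, pvBalB]
        simp only [if_neg hc1, if_neg hc2]
        exact ih top n h0 hn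

-- strip: foldl over a removed adjacent pair collapses
theorem strip_pair (a b : List Char) (acc : List Char) :
    (a ++ '[' :: ']' :: b).foldl pvStripStep acc = (a ++ b).foldl pvStripStep acc := by
  have h1 : ∀ X : List Char, pvStripStep X '[' = X ++ ['['] := by
    intro X; rw [pvStripStep, if_neg (by simp)]
  have h2 : ∀ X : List Char, pvStripStep (X ++ ['[']) ']' = X := by
    intro X; rw [pvStripStep, if_pos (by simp)]; simp
  rw [List.foldl_append, List.foldl_append, List.foldl_cons, List.foldl_cons, h1, h2]

-- strip: identity where no adjacent pair exists
theorem strip_id (l : List Char) : ∀ (p : List Char),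
    pvFindPair l = none →
    (p.getLast? = some '[' → l.head? ≠ some ']') →
    l.foldl pvStripStep p = p ++ l := by
  induction l with
  | nil => intro p _ _; simp
  | cons c rest ih =>
    intro p hnp hb
    simp only [pvFindPair] at hnp
    have hnc : ¬(c = '[' ∧ rest.head? = some ']') := by
      intro hcc
      rw [if_pos hcc] at hnp
      simp at hnp
    rw [if_neg hnc] at hnp
    have hrest : pvFindPair rest = none := by
      cases h : pvFindPair rest with
      | none => rfl
      | some j => rw [h] at hnp; simp at hnp
    have hstep : pvStripStep p c = p ++ [c] := by
      rw [pvStripStep, if_neg]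
      intro hcond
      simp only [Bool.and_eq_true, decide_eq_true_eq, beq_iff_eq] at hcond
      exact hb hcond.2 (by simp [hcond.1])
    simp only [List.foldl_cons, hstep]
    rw [ih (p ++ [c]) hrest]
    · simp
    · intro hlast
      simp only [List.getLast?_concat, Option.some.injEq] at hlast
      intro hhead
      cases rest with
      | nil => simp at hhead
      | cons d t =>
        simp only [List.head?_cons, Option.some.injEq] at hhead
        exact hnc ⟨hlast, by simp [hhead]⟩

-- decomposition of the leftmost-pair index
theorem findPair_decomp (l : List Char) : ∀ (i : Nat), pvFindPair l = some i →
    l.take i ++ '[' :: ']' :: l.drop (i + 2) = l := by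
  induction l with
  | nil => intro i h; simp [pvFindPair] at h
  | cons c rest ih =>
    intro i h
    simp only [pvFindPair] at h
    split at h
    · rename_i hcc
      obtain ⟨rfl, hh⟩ := hcc
      simp only [Option.some.injEq] at h
      subst h
      cases rest with
      | nil => simp at hh
      | cons d t =>
        simp only [List.head?_cons, Option.some.injEq] at hh
        subst hh
        simp
    · obtain ⟨j, hj, rfl⟩ := Option.map_eq_some_iff.mp h
      have := ih j hj
      simpa [List.take_succ_cons, List.drop_succ_cons] using congrArg (c :: ·) this

theorem refactor_eq_strip (l : List Char) :
    pvRefactorA l = l.foldl pvStripStep [] := by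
  induction l using pvRefactorA.induct with
  | case1 l i h ih =>
    rw [pvRefactorA.eq_def]
    split
    · rename_i i' h'
      rw [h] at h'
      obtain rfl : i = i' := Option.some.inj h'
      rw [ih]
      have hdec := findPair_decomp l i h
      calc (l.take i ++ l.drop (i + 2)).foldl pvStripStep []
          = (l.take i ++ '[' :: ']' :: l.drop (i + 2)).foldl pvStripStep [] :=
            (strip_pair _ _ _).symm
        _ = l.foldl pvStripStep [] := by rw [hdec]
    · rename_i h'
      rw [h'] at h; cases h
  | case2 l h =>
    rw [pvRefactorA.eq_def]
    split
    · rename_i i' h'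
      rw [h'] at h; cases h
    · exact (strip_id l [] h (by simp)).symm

-- A's codegen loop ignores characters outside CODE
theorem foldl_stepA_filter (l : List Char) : ∀ (st : List Char × List Char × Int × Bool),
    l.foldl pvStepA st = (l.filter pvInCode).foldl pvStepA st := by
  induction l with
  | nil => intro st; rfl
  | cons c rest ih =>
    intro st
    by_cases hc : pvInCode c = true
    · simp only [List.filter_cons, hc, if_pos trivial, List.foldl_cons]
      exact ih _
    · have hc' : pvInCode c = false := by simpa using hc
      simp only [List.filter_cons, hc', List.foldl_cons, stepA_skip c hc']
      exact ih st

def pvFinishA (st : List Char × List Char × Int × Bool) : List Char :=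
  if st.2.2.2 = false then st.1 ++ pvFlush st.2.2.1 else st.1

-- a maximal arithmetic run only accumulates the counter
theorem arith_run (t : List Char) : ∀ (r sp : List Char) (p : Int),
    (∀ c ∈ t, pvArith c = true) →
    t.foldl pvStepA (r, sp, p, false) = (r, sp, p + t.length, false) := by
  induction t with
  | nil => intro r sp p _; simp
  | cons c rest ih =>
    intro r sp p h
    have hc := h c (by simp)
    simp only [List.foldl_cons, stepA_arith_false c hc]
    rw [ih r sp (p + 1) (fun d hd => h d (by simp [hd]))]
    have : p + 1 + (rest.length : Int) = p + ((c :: rest).length : Int) := by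
      push_cast [List.length_cons]
      ring
    rw [this]

-- equation lemmas for B's tokenizer
theorem genB_nil (sp : List Char) : pvGenB [] sp = [] := by rw [pvGenB]

theorem genB_arith (c : Char) (rest sp : List Char) (h : pvArith c = true) :
    pvGenB (c :: rest) sp =
      sp ++ pvCode c ++ pvFlush ((1 + (rest.takeWhile pvArith).length : Nat))
        ++ pvGenB (rest.dropWhile pvArith) sp := by
  rw [pvGenB, if_pos h]

theorem genB_nonarith (c : Char) (rest sp : List Char) (h : pvArith c = false) :
    pvGenB (c :: rest) sp =
      (if c = ']' then [] else sp) ++ pvCode c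
        ++ pvGenB rest (if c = '[' then "  ".toList else if c = ']' then [] else sp) := by
  rw [pvGenB, if_neg (by simp [h])]

-- codegen: A's flag/counter loop equals B's run tokenizer, on lists of CODE chars
theorem gen_eq (N : Nat) : ∀ (l : List Char), l.length ≤ N → (∀ c ∈ l, pvInCode c = true) →
    ∀ (r sp : List Char),
      pvFinishA (l.foldl pvStepA (r, sp, 0, true)) = r ++ pvGenB l sp := by
  induction N with
  | zero =>
    intro l hl _ r sp
    have hnil : l = [] := by
      cases l with
      | nil => rfl
      | cons a t => simp at hl
    subst hnil
    simp [pvFinishA, genB_nil]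
  | succ N ih =>
    intro l hl hin r sp
    cases l with
    | nil => simp [pvFinishA, genB_nil]
    | cons c rest =>
      by_cases ha : pvArith c = true
      · -- arithmetic run
        have hrest : rest = rest.takeWhile pvArith ++ rest.dropWhile pvArith :=
          (List.takeWhile_append_dropWhile).symm
        have htarith : ∀ d ∈ rest.takeWhile pvArith, pvArith d = true :=
          fun d hd => List.mem_takeWhile_imp hd
        simp only [List.foldl_cons, stepA_arith_true c ha]
        rw [show (0 : Int) + 1 = 1 by ring]
        conv_lhs => rw [hrest]
        rw [List.foldl_append, arith_run _ _ _ _ htarith, genB_arith c rest sp ha]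
        cases hd : rest.dropWhile pvArith with
        | nil =>
          simp [pvFinishA, genB_nil, List.append_assoc, Nat.cast_add, Nat.cast_one]
        | cons c' rest' =>
          have hc'na : pvArith c' = false := by
            have hne : rest.dropWhile pvArith ≠ [] := by simp [hd]
            have := List.head_dropWhile_not (w := hne)
            simpa [hd] using this
          have hc'in : pvInCode c' = true := by
            have hmem : c' ∈ rest := by
              have : c' ∈ rest.dropWhile pvArith := by rw [hd]; simp
              exact (List.dropWhile_sublist _).mem this
            exact hin c' (by simp [hmem])
          simp only [List.foldl_cons, stepA_nonarith_false c' hc'na hc'in]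
          rw [ih rest' ?hlen (fun d hd' => by
            have : d ∈ rest := by
              have : d ∈ rest.dropWhile pvArith := by rw [hd]; simp [hd']
              exact (List.dropWhile_sublist _).mem this
            exact hin d (by simp [this]))]
          case hlen =>
            have h1 : rest'.length + 1 ≤ rest.length := by
              have := List.length_dropWhile_le (p := pvArith) (l := rest)
              rw [hd] at this
              simpa using this
            have h2 : rest.length + 1 ≤ N + 1 := by simpa using hl
            omega
          rw [genB_nonarith c' rest' sp hc'na]
          simp [List.append_assoc, Nat.cast_add, Nat.cast_one]
      · -- single non-arith command
        have ha' : pvArith c = false := by simpa using ha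
        have hcin : pvInCode c = true := hin c (by simp)
        simp only [List.foldl_cons, stepA_nonarith_true c ha' hcin]
        rw [ih rest (by simpa using hl) (fun d hd => hin d (by simp [hd]))]
        rw [genB_nonarith c rest sp ha']
        simp [List.append_assoc]

-- ===== VERDICT (by name: the statement is the Claim_ definition above) =====
theorem brainfuck_to_c_spec : Claim_equal_brainfuck_to_c := by
  intro s _
  unfold Spec_brainfuck_to_c brainfuck_to_c brainfuck_to_c_alt
  have hval : pvValidA s.toList = pvBalB s.toList 0 := by
    have := valid_eq_bal s.toList 0 0 le_rfl le_rfl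
    simpa [pvValidA] using this
  rw [hval, scan_eq]
  by_cases hb : pvBalB s.toList 0 = true
  · rw [if_pos hb]
    simp only [hb, if_true]
    have hgen2 : pvFinishA ((pvRefactorA s.toList).foldl pvStepA ([], [], 0, true))
        = pvGenB ((s.toList.foldl pvStripStep []).filter pvInCode) [] := by
      rw [foldl_stepA_filter, refactor_eq_strip]
      have := gen_eq ((s.toList.foldl pvStripStep []).filter pvInCode).length
        ((s.toList.foldl pvStripStep []).filter pvInCode) le_rfl
        (fun c hc => (List.mem_filter.mp hc).2) [] []
      simpa using this
    have hfin : ∀ st : List Char × List Char × Int × Bool,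
        (if st.2.2.2 = false then String.mk (st.1 ++ pvFlush st.2.2.1) else String.mk st.1)
          = String.mk (pvFinishA st) := by
      intro st
      unfold pvFinishA
      split <;> rfl
    simp only [hfin, hgen2]
  · rw [if_neg hb]
    have hb' : pvBalB s.toList 0 = false := by simpa using hb
    simp [hb']
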